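-- pv_equiv track=rewrite | github.com/sudhakarnaikr/COURSERA_ALGORITMS_SPECIALIZATION | c2_week3.py | calculate_median_sum
-- ===== SOURCE A (Python) =====
-- import heapq
--
-- def calculate_median_sum(nums):
--     min_heap = []  # For the larger half of the numbers
--     max_heap = []  # For the smaller half of the numbers
--     median_sum = 0
--
--     for num in nums:
--         if not max_heap or num < -max_heap[0]:
--             heapq.heappush(max_heap, -num)
--         else:
--             heapq.heappush(min_heap, num)
--
--         # Balance the heaps to ensure their sizes differ by at most 1
--         if len(max_heap) > len(min_heap) + 1:
--             heapq.heappush(min_heap, -heapq.heappop(max_heap))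
--         elif len(min_heap) > len(max_heap):
--             heapq.heappush(max_heap, -heapq.heappop(min_heap))
--
--         # Calculate the median and update the sum
--         if len(max_heap) == len(min_heap):
--             median = -max_heap[0]
--         else:
--             median = -max_heap[0]
--
--         median_sum = (median_sum + median) % 10000
--
--     return median_sum
-- ===== SOURCE B (Python) =====
-- def calculate_median_sum(nums):
--     lst = []  # kept sorted ascending
--     median_sum = 0
--     for num in nums:
--         # binary search for the insertion point (rightmost, i.e. after equals)
--         lo, hi = 0, len(lst)
--         while lo < hi:
--             mid = (lo + hi) // 2
--             if num < lst[mid]: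
--                 hi = mid
--             else:
--                 lo = mid + 1
--         lst.insert(lo, num)
--         median_sum = (median_sum + lst[(len(lst) - 1) // 2]) % 10000
--     return median_sum
-- ===== Notes on version B (the rewrite author's own statement) =====
-- stated objective: simpler
-- what changed: Replaces the two-heap (max-heap/min-heap) balancing scheme with a single sorted list maintained by hand-written binary-search insertion, reading the lower median directly at index (len-1)//2.
import Mathlib
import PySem

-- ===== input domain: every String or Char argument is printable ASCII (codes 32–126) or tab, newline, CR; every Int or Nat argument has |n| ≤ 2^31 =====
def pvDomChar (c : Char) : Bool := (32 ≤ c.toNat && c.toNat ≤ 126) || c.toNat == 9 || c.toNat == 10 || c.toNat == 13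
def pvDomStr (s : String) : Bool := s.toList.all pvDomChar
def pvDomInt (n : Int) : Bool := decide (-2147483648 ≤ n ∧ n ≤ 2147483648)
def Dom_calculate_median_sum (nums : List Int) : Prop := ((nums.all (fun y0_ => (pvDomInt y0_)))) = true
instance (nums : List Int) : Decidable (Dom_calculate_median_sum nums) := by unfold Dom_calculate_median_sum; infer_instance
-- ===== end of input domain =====

-- B replaces A's two balanced heaps by one sorted list with binary-search insertion (simpler); return values proved equal.

-- ===== PORT A =====
-- A uses the stdlib's heapq.heappush/heappop/heap[0]; those stdlib calls are ported by their
-- min-heap contract: the heap is modeled as an ascending sorted list, whose head is the heap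
-- root — exact for every observation A makes (heap[0] and heappop = pop the minimum).
def heappush : List Int → Int → List Int
  | [], v => [v]
  | y :: ys, v => if y ≤ v then y :: heappush ys v else v :: y :: ys

-- A only pops nonempty heaps (the size bookkeeping guarantees it), so headD's default is never read.
def heappop (h : List Int) : Int × List Int := (h.headD 0, h.tail)

def stepA (st : List Int × List Int × Int) (num : Int) : List Int × List Int × Int :=
  let maxh0 := st.1
  let minh0 := st.2.1
  let s := st.2.2
  -- if not max_heap or num < -max_heap[0]: push -num on max_heap else push num on min_heap
  let maxh1 := if maxh0.isEmpty || num < -(maxh0.headD 0) then heappush maxh0 (-num) else maxh0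
  let minh1 := if maxh0.isEmpty || num < -(maxh0.headD 0) then minh0 else heappush minh0 num
  -- balance the heaps so the sizes differ by at most 1
  let maxh2 := if minh1.length + 1 < maxh1.length then (heappop maxh1).2
               else if maxh1.length < minh1.length then heappush maxh1 (-(heappop minh1).1)
               else maxh1
  let minh2 := if minh1.length + 1 < maxh1.length then heappush minh1 (-(heappop maxh1).1)
               else if maxh1.length < minh1.length then (heappop minh1).2
               else minh1
  -- A's if/else computes the same expression in both branches; kept as written
  let median := if maxh2.length == minh2.length then -(maxh2.headD 0) else -(maxh2.headD 0)
  (maxh2, minh2, PySem.Int.mod (s + median) 10000)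

def calculate_median_sum (nums : List Int) : Int :=
  (nums.foldl stepA ([], [], 0)).2.2

-- ===== PORT B =====
-- binary search for the rightmost insertion point; lst[mid] is always in range (lo < hi ≤ len)
def bsr (lst : List Int) (num : Int) (lo hi : Nat) : Nat :=
  if _h : lo < hi then
    let mid := (lo + hi) / 2
    if num < lst.getD mid 0 then bsr lst num lo mid
    else bsr lst num (mid + 1) hi
  else lo
termination_by hi - lo
decreasing_by all_goals omega

def stepB (st : List Int × Int) (num : Int) : List Int × Int :=
  let lst := st.1.insertIdx (bsr st.1 num 0 st.1.length) num
  -- lst[(len(lst)-1)//2]: the index is always in range (lst is nonempty here)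
  (lst, PySem.Int.mod (st.2 + lst.getD ((lst.length - 1) / 2) 0) 10000)

def calculate_median_sum_alt (nums : List Int) : Int :=
  (nums.foldl stepB ([], 0)).2

-- ===== PRECONDITION & SPEC =====
def Spec_calculate_median_sum (nums : List Int) (out : Int) : Prop := out = calculate_median_sum_alt nums
instance (nums : List Int) (out : Int) : Decidable (Spec_calculate_median_sum nums out) := by unfold Spec_calculate_median_sum; infer_instance

-- ===== CLAIM (what is proved, stated in full; the proofs are below) =====
def Claim_equal_calculate_median_sum : Prop := ∀ (nums : List Int), Dom_calculate_median_sum nums → Spec_calculate_median_sum nums (calculate_median_sum nums)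

-- ===== LEMMAS AND PROOFS =====

-- ordered insertion after equal elements (what both heappush's sorted-list model and B's
-- binary-search insertion compute on a sorted list)
def ins (x : Int) : List Int → List Int
  | [] => [x]
  | y :: ys => if y ≤ x then y :: ins x ys else x :: y :: ys

-- the stored max-heap: negations of the lower half, ascending
def nrev (T : List Int) : List Int := (T.map (fun t => -t)).reverse

theorem heappush_eq_ins (h : List Int) (v : Int) : heappush h v = ins v h := by
  induction h with
  | nil => rfl
  | cons y ys ih => simp [heappush, ins, ih]

theorem ins_perm (x : Int) (l : List Int) : (ins x l).Perm (x :: l) := by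
  induction l with
  | nil => rfl
  | cons y ys ih =>
    by_cases h : y ≤ x
    · simpa [ins, h] using ((ih.cons y).trans (List.Perm.swap x y ys))
    · simp [ins, h]

theorem mem_ins {a x : Int} {l : List Int} : a ∈ ins x l ↔ a = x ∨ a ∈ l := by
  rw [(ins_perm x l).mem_iff]; simp

theorem length_ins (x : Int) (l : List Int) : (ins x l).length = l.length + 1 := by
  simpa using (ins_perm x l).length_eq

theorem ins_cons_of_le {x y : Int} (ys : List Int) (h : y ≤ x) :
    ins x (y :: ys) = y :: ins x ys := by simp [ins, h]

theorem ins_pairwise {x : Int} {l : List Int} (h : l.Pairwise (· ≤ ·)) :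
    (ins x l).Pairwise (· ≤ ·) := by
  induction l with
  | nil => simp [ins]
  | cons y ys ih =>
    rcases List.pairwise_cons.1 h with ⟨hy, hys⟩
    by_cases hyx : y ≤ x
    · rw [ins_cons_of_le ys hyx]
      refine List.pairwise_cons.2 ⟨?_, ih hys⟩
      intro a ha
      rcases mem_ins.1 ha with rfl | ha
      · exact hyx
      · exact hy a ha
    · rw [show ins x (y :: ys) = x :: y :: ys from by simp [ins, hyx]]
      refine List.pairwise_cons.2 ⟨?_, h⟩
      intro a ha
      rcases List.mem_cons.1 ha with rfl | ha
      · omega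
      · exact le_trans (by omega) (hy a ha)

theorem ins_append_front {x : Int} {T D : List Int} (h : ∃ t ∈ T, x < t) :
    ins x (T ++ D) = ins x T ++ D := by
  induction T with
  | nil => simp at h
  | cons t T' ih =>
    by_cases ht : t ≤ x
    · have : ∃ u ∈ T', x < u := by
        rcases h with ⟨u, hu, hxu⟩
        rcases List.mem_cons.1 hu with rfl | hu
        · omega
        · exact ⟨u, hu, hxu⟩
      simp [ins, ht, ih this]
    · simp [ins, ht]

theorem ins_append_inside {x : Int} {T D : List Int} (h : ∀ t ∈ T, t ≤ x) :
    ins x (T ++ D) = T ++ ins x D := by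
  induction T with
  | nil => simp
  | cons t T' ih =>
    have ht : t ≤ x := h t (by simp)
    simp [ins, ht, ih fun u hu => h u (by simp [hu])]

theorem nrev_length (T : List Int) : (nrev T).length = T.length := by simp [nrev]

theorem nrev_perm (T : List Int) : (nrev T).Perm (T.map (fun t => -t)) :=
  List.reverse_perm _

theorem mem_nrev {a : Int} {T : List Int} : a ∈ nrev T ↔ ∃ t ∈ T, -t = a := by
  simp [nrev]

theorem nrev_append_singleton (T : List Int) (a : Int) :
    nrev (T ++ [a]) = -a :: nrev T := by simp [nrev]

theorem nrev_pairwise {T : List Int} (h : T.Pairwise (· ≤ ·)) :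
    (nrev T).Pairwise (· ≤ ·) := by
  unfold nrev
  rw [List.pairwise_reverse]
  exact (List.pairwise_map).2 (h.imp (by intro a b hab; omega))

theorem sorted_eq_of_perm {l₁ l₂ : List Int} (hp : l₁.Perm l₂)
    (h₁ : l₁.Pairwise (· ≤ ·)) (h₂ : l₂.Pairwise (· ≤ ·)) : l₁ = l₂ :=
  List.Perm.eq_of_pairwise (fun _ _ _ _ hab hba => le_antisymm hab hba) h₁ h₂ hp

-- sorted list: every element is ≤ the last one
theorem mem_le_getLast {T : List Int} (h : T.Pairwise (· ≤ ·)) (hT : T ≠ [])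
    {t : Int} (ht : t ∈ T) : t ≤ T.getLast hT := by
  have hsplit := List.dropLast_append_getLast hT
  rw [← hsplit] at h ht
  rw [List.pairwise_append] at h
  rcases List.mem_append.1 ht with h1 | h2
  · exact h.2.2 t h1 _ (by simp)
  · simp only [List.mem_singleton] at h2
    omega

theorem nrev_headD {T : List Int} (hT : T ≠ []) :
    (nrev T).headD 0 = -(T.getLast hT) := by
  conv_lhs => rw [← List.dropLast_append_getLast hT]
  rw [nrev_append_singleton]
  rfl

theorem nrev_tail (T : List Int) : (nrev T).tail = nrev T.dropLast := by
  rcases T.eq_nil_or_concat with rfl | ⟨T', a, rfl⟩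
  · rfl
  · rw [List.concat_eq_append, nrev_append_singleton]
    simp


theorem getD_append_left {l₁ l₂ : List Int} {i : Nat} (h : i < l₁.length) :
    (l₁ ++ l₂).getD i 0 = l₁.getD i 0 := by
  rw [List.getD_eq_getElem _ _ (by simp; omega), List.getD_eq_getElem _ _ h,
    List.getElem_append_left h]

theorem getLast_eq_getD {T : List Int} (h : T ≠ []) :
    T.getLast h = T.getD (T.length - 1) 0 := by
  rw [List.getLast_eq_getElem, List.getD_eq_getElem _ _ (by
    cases T with
    | nil => exact absurd rfl h
    | cons a l => simp)]

theorem cons_headD_tail {l : List Int} (h : l ≠ []) : l.headD 0 :: l.tail = l := by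
  cases l with
  | nil => exact absurd rfl h
  | cons a l => rfl

theorem sorted_getD_mono {S : List Int} (h : S.Pairwise (· ≤ ·)) {i j : Nat}
    (hij : i ≤ j) (hj : j < S.length) : S.getD i 0 ≤ S.getD j 0 := by
  rcases Nat.eq_or_lt_of_le hij with rfl | hlt
  · exact le_refl _
  · rw [List.getD_eq_getElem _ _ (by omega), List.getD_eq_getElem _ _ hj]
    exact List.pairwise_iff_getElem.1 h i j (by omega) hj hlt

theorem bsr_spec (S : List Int) (num : Int) (hs : S.Pairwise (· ≤ ·)) :
    ∀ (fuel lo hi : Nat), hi - lo ≤ fuel → lo ≤ hi → hi ≤ S.length →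
    (lo ≤ bsr S num lo hi ∧ bsr S num lo hi ≤ hi) ∧
    (∀ i, lo ≤ i → i < bsr S num lo hi → S.getD i 0 ≤ num) ∧
    (∀ i, bsr S num lo hi ≤ i → i < hi → num < S.getD i 0) := by
  intro fuel
  induction fuel with
  | zero =>
    intro lo hi hf hlh hhl
    have : lo = hi := by omega
    subst this
    rw [bsr, dif_neg (by omega)]
    exact ⟨⟨le_refl _, le_refl _⟩, by omega, by omega⟩
  | succ f ih =>
    intro lo hi hf hlh hhl
    by_cases hlt : lo < hi
    · rw [bsr, dif_pos hlt]
      by_cases hm : num < S.getD ((lo + hi) / 2) 0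
      · rw [if_pos hm]
        rcases ih lo ((lo + hi) / 2) (by omega) (by omega) (by omega) with ⟨hb, h1, h2⟩
        refine ⟨⟨hb.1, by omega⟩, h1, ?_⟩
        intro i hri hih
        by_cases hi2 : i < (lo + hi) / 2
        · exact h2 i hri hi2
        · exact lt_of_lt_of_le hm (sorted_getD_mono hs (by omega) (by omega))
      · rw [if_neg hm]
        rcases ih ((lo + hi) / 2 + 1) hi (by omega) (by omega) hhl with ⟨hb, h1, h2⟩
        refine ⟨⟨by omega, hb.2⟩, ?_, h2⟩
        intro i hli hir
        by_cases hi2 : (lo + hi) / 2 + 1 ≤ i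
        · exact h1 i hi2 hir
        · exact le_trans (sorted_getD_mono hs (show i ≤ (lo + hi) / 2 by omega) (by omega))
            (by omega)
    · rw [bsr, dif_neg hlt]
      exact ⟨⟨le_refl _, by omega⟩, by omega, by omega⟩

theorem insertIdx_eq_ins (x : Int) :
    ∀ (S : List Int) (p : Nat), p ≤ S.length →
    (∀ i, i < p → S.getD i 0 ≤ x) → (∀ i, p ≤ i → i < S.length → x < S.getD i 0) →
    S.insertIdx p x = ins x S := by
  intro S
  induction S with
  | nil =>
    intro p hp _ _
    have : p = 0 := by simpa using hp
    subst this
    rfl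
  | cons y ys ih =>
    intro p hp h1 h2
    cases p with
    | zero =>
      have hxy : x < y := h2 0 (le_refl _) (by simp)
      rw [show ins x (y :: ys) = x :: y :: ys from by simp [ins]; omega]
      rfl
    | succ p' =>
      have hyx : y ≤ x := h1 0 (by omega)
      rw [List.insertIdx_succ_cons, ins_cons_of_le _ hyx,
        ih p' (by simpa using hp) (fun i hi => h1 (i + 1) (by omega))
          (fun i hpi hil => h2 (i + 1) (by omega) (by simpa using hil))]

theorem stepB_eq (S : List Int) (s num : Int) (hs : S.Pairwise (· ≤ ·)) :
    stepB (S, s) num =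
      (ins num S, PySem.Int.mod (s + (ins num S).getD (S.length / 2) 0) 10000) := by
  rcases bsr_spec S num hs S.length 0 S.length (by omega) (by omega) (le_refl _)
    with ⟨⟨_, hb2⟩, h1, h2⟩
  have hins : S.insertIdx (bsr S num 0 S.length) num = ins num S := by
    exact insertIdx_eq_ins num S _ hb2 (fun i hi => h1 i (by omega) hi) h2
  simp only [stepB, hins, length_ins, Nat.add_sub_cancel]


theorem cross_le {T D : List Int} (hs : (T ++ D).Pairwise (· ≤ ·)) :
    ∀ t ∈ T, ∀ d ∈ D, t ≤ d := (List.pairwise_append.1 hs).2.2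

theorem stepA_inv (T D : List Int) (s num : Int)
    (hs : (T ++ D).Pairwise (· ≤ ·))
    (hT : T.length = ((T ++ D).length + 1) / 2) :
    ∃ T₂ D₂ : List Int,
      ins num (T ++ D) = T₂ ++ D₂ ∧
      T₂.length = ((ins num (T ++ D)).length + 1) / 2 ∧
      stepA (nrev T, D, s) num =
        (nrev T₂, D₂, PySem.Int.mod (s + (ins num (T ++ D)).getD ((T ++ D).length / 2) 0) 10000) := by
  by_cases hne : T = []
  · subst hne
    have hD : D = [] := by
      rw [List.length_append] at hT
      simp only [List.length_nil] at hT
      have : D = [] := by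
        cases D with
        | nil => rfl
        | cons a l => simp at hT; omega
      exact this
    subst hD
    exact ⟨[num], [], by simp [ins], by simp [ins], by simp [stepA, heappush, nrev, ins]⟩
  · have hTs : T.Pairwise (· ≤ ·) := (List.pairwise_append.1 hs).1
    have hDs : D.Pairwise (· ≤ ·) := (List.pairwise_append.1 hs).2.1
    have hcross := cross_le hs
    have hTpos : 0 < T.length := List.length_pos_of_ne_nil hne
    have hbound : T.length = (T.length + D.length + 1) / 2 := by
      rw [List.length_append] at hT; exact hT
    have hnrne : nrev T ≠ [] := by
      cases T with
      | nil => exact absurd rfl hne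
      | cons a l => simp [nrev]
    have hEmpty : (nrev T).isEmpty = false := by
      rw [List.isEmpty_eq_false_iff]
      exact hnrne
    have hHead : (nrev T).headD 0 = -(T.getLast hne) := nrev_headD hne
    have hTmem : T.getLast hne ∈ T := List.getLast_mem hne
    by_cases hcase : num < T.getLast hne
    · -- LEFT: num goes into the max-heap (lower half)
      have hE1 : heappush (nrev T) (-num) = nrev (ins num T) := by
        rw [heappush_eq_ins]
        refine sorted_eq_of_perm ?_ (ins_pairwise (nrev_pairwise hTs))
          (nrev_pairwise (ins_pairwise hTs))
        have p1 : List.Perm (ins (-num) (nrev T)) (-num :: nrev T) := ins_perm _ _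
        have p2 : List.Perm (-num :: nrev T) (-num :: T.map (fun t => -t)) :=
          (nrev_perm T).cons _
        have p4 : List.Perm (-num :: T.map (fun t => -t)) ((ins num T).map (fun t => -t)) := by
          have h1 : (-num :: T.map (fun t => -t)) = (num :: T).map (fun t => -t) := by simp
          rw [h1]
          exact (List.Perm.map _ (ins_perm num T)).symm
        exact ((p1.trans p2).trans p4).trans (nrev_perm _).symm
      have hE2 : ins num (T ++ D) = ins num T ++ D := ins_append_front ⟨_, hTmem, hcase⟩
      have hlenT' : (ins num T).length = T.length + 1 := length_ins _ _
      have hT'ne : ins num T ≠ [] := by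
        intro h; rw [h] at hlenT'; simp at hlenT'
      have hkins : (ins num (T ++ D)).length = T.length + D.length + 1 := by
        rw [length_ins, List.length_append]
      rcases Nat.lt_or_ge D.length T.length with hodd | heven
      · -- k odd: rebalance, pop the max-heap root into the min-heap
        have hd : D.length + 1 = T.length := by omega
        have hT2len : (ins num T).dropLast.length = T.length := by
          rw [List.length_dropLast, hlenT', Nat.add_sub_cancel]
        have hT2ne : (ins num T).dropLast ≠ [] := by
          intro h; rw [h] at hT2len; simp at hT2len; omega
        have hg'mem : (ins num T).getLast hT'ne ∈ ins num T := List.getLast_mem hT'ne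
        have hg'le : ∀ x ∈ D, (ins num T).getLast hT'ne ≤ x := by
          intro x hx
          rcases mem_ins.1 hg'mem with h' | h'
          · rw [h']; exact le_trans (le_of_lt hcase) (hcross _ hTmem x hx)
          · exact hcross _ h' x hx
        have hsplit : ins num T = (ins num T).dropLast ++ [(ins num T).getLast hT'ne] :=
          (List.dropLast_append_getLast hT'ne).symm
        refine ⟨(ins num T).dropLast, (ins num T).getLast hT'ne :: D, ?_, ?_, ?_⟩
        · rw [hE2]
          conv_lhs => rw [hsplit]
          simp
        · rw [hkins, List.length_dropLast, hlenT']
          omega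
        · have hpushD : heappush D ((ins num T).getLast hT'ne) =
              (ins num T).getLast hT'ne :: D := by
            rw [heappush_eq_ins]
            exact sorted_eq_of_perm (ins_perm _ _) (ins_pairwise hDs)
              (List.pairwise_cons.2 ⟨hg'le, hDs⟩)
          have hmed : (ins num (T ++ D)).getD ((T ++ D).length / 2) 0 =
              ((ins num T).dropLast).getLast hT2ne := by
            rw [hE2, List.length_append]
            have hidx : (T.length + D.length) / 2 = T.length - 1 := by omega
            rw [hidx]
            conv_lhs => rw [hsplit]
            rw [List.append_assoc, getD_append_left (by rw [hT2len]; omega),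
              getLast_eq_getD hT2ne, hT2len]
          simp only [stepA, hEmpty, hHead, Bool.false_or, neg_neg, hcase, decide_true,
            if_true, hE1, heappop]
          rw [nrev_headD hT'ne, nrev_tail]
          simp only [nrev_length, hlenT', neg_neg]
          rw [if_pos (by omega), hpushD]
          rw [nrev_headD hT2ne]
          simp only [ite_self, neg_neg, hmed]
          split_ifs <;> first | rfl | omega
      · -- k even: no rebalance
        have hd : D.length = T.length := by omega
        refine ⟨ins num T, D, hE2, ?_, ?_⟩
        · rw [hkins, hlenT']; omega
        · have hmed : (ins num (T ++ D)).getD ((T ++ D).length / 2) 0 =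
              (ins num T).getLast hT'ne := by
            rw [hE2, List.length_append]
            have hidx : (T.length + D.length) / 2 = T.length := by omega
            rw [hidx, getD_append_left (by omega), getLast_eq_getD hT'ne, hlenT']
            simp
          simp only [stepA, hEmpty, hHead, Bool.false_or, neg_neg, hcase, decide_true,
            if_true, hE1, heappop]
          simp only [nrev_length, hlenT']
          rw [if_neg (by omega), if_neg (by omega)]
          rw [nrev_headD hT'ne]
          simp only [ite_self, neg_neg, hmed]
          split_ifs <;> first | rfl | omega
    · -- RIGHT: num goes into the min-heap (upper half)
      have hgle : T.getLast hne ≤ num := by omega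
      have hE1 : heappush D num = ins num D := heappush_eq_ins _ _
      have hE2 : ins num (T ++ D) = T ++ ins num D :=
        ins_append_inside (fun t ht => le_trans (mem_le_getLast hTs hne ht) hgle)
      have hlenD' : (ins num D).length = D.length + 1 := length_ins _ _
      have hD'ne : ins num D ≠ [] := by
        intro h; rw [h] at hlenD'; simp at hlenD'
      have hkins : (ins num (T ++ D)).length = T.length + D.length + 1 := by
        rw [length_ins, List.length_append]
      have hgleD' : ∀ x ∈ ins num D, T.getLast hne ≤ x := by
        intro x hx
        rcases mem_ins.1 hx with rfl | hx'
        · exact hgle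
        · exact hcross _ hTmem x hx'
      rcases Nat.lt_or_ge T.length (D.length + 1) with heven | hodd
      · -- k even: rebalance, pop the min-heap root into the max-heap
        have hd : D.length = T.length := by omega
        have hh'mem : (ins num D).headD 0 ∈ ins num D := by
          cases h : ins num D with
          | nil => exact absurd h hD'ne
          | cons a l => simp
        have hpushT : heappush (nrev T) (-((ins num D).headD 0)) =
            nrev (T ++ [(ins num D).headD 0]) := by
          rw [heappush_eq_ins, nrev_append_singleton]
          refine sorted_eq_of_perm (ins_perm _ _) (ins_pairwise (nrev_pairwise hTs)) ?_
          refine List.pairwise_cons.2 ⟨?_, nrev_pairwise hTs⟩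
          intro y hy
          rcases mem_nrev.1 hy with ⟨t, ht, rfl⟩
          have h1 : t ≤ T.getLast hne := mem_le_getLast hTs hne ht
          have h2 : T.getLast hne ≤ (ins num D).headD 0 := hgleD' _ hh'mem
          omega
        have hTappne : T ++ [(ins num D).headD 0] ≠ [] := by simp
        refine ⟨T ++ [(ins num D).headD 0], (ins num D).tail, ?_, ?_, ?_⟩
        · rw [hE2, List.append_assoc, List.singleton_append, cons_headD_tail hD'ne]
        · rw [hkins]
          simp only [List.length_append, List.length_singleton]
          omega
        · have hmed : (ins num (T ++ D)).getD ((T ++ D).length / 2) 0 =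
              (T ++ [(ins num D).headD 0]).getLast hTappne := by
            rw [hE2, List.length_append]
            have hidx : (T.length + D.length) / 2 = T.length := by omega
            rw [hidx]
            conv_lhs => rw [← cons_headD_tail hD'ne,
              show T ++ ((ins num D).headD 0 :: (ins num D).tail) =
                (T ++ [(ins num D).headD 0]) ++ (ins num D).tail by simp]
            rw [getD_append_left (by simp), getLast_eq_getD hTappne]
            simp
          simp only [stepA, hEmpty, hHead, neg_neg, hcase, decide_false,
            Bool.or_false, Bool.false_eq_true, if_false, hE1, heappop]
          simp only [nrev_length, hlenD']
          rw [if_neg (by omega), if_pos (by omega), if_neg (by omega), if_pos (by omega)]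
          rw [hpushT, nrev_headD hTappne]
          simp only [ite_self, neg_neg, hmed]
      · -- k odd: no rebalance
        have hd : D.length + 1 = T.length := by omega
        refine ⟨T, ins num D, hE2, ?_, ?_⟩
        · rw [hkins]; omega
        · have hmed : (ins num (T ++ D)).getD ((T ++ D).length / 2) 0 =
              T.getLast hne := by
            rw [hE2, List.length_append]
            have hidx : (T.length + D.length) / 2 = T.length - 1 := by omega
            rw [hidx, getD_append_left (by omega), getLast_eq_getD hne]
          simp only [stepA, hEmpty, hHead, neg_neg, hcase, decide_false,
            Bool.or_false, Bool.false_eq_true, if_false, hE1, heappop]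
          simp only [nrev_length, hlenD']
          rw [if_neg (by omega), if_neg (by omega)]
          rw [nrev_headD hne]
          simp only [ite_self, neg_neg, hmed]
          split_ifs <;> first | rfl | omega

theorem fold_inv (nums : List Int) : ∀ (T D : List Int) (s : Int),
    (T ++ D).Pairwise (· ≤ ·) → T.length = ((T ++ D).length + 1) / 2 →
    (nums.foldl stepA (nrev T, D, s)).2.2 = (nums.foldl stepB (T ++ D, s)).2 := by
  induction nums with
  | nil => intro T D s _ _; rfl
  | cons num rest ih =>
    intro T D s hs hT
    rcases stepA_inv T D s num hs hT with ⟨T₂, D₂, e1, e2, e3⟩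
    rw [List.foldl_cons, List.foldl_cons, e3, stepB_eq (T ++ D) s num hs, e1]
    exact ih T₂ D₂ _ (e1 ▸ ins_pairwise hs) (e1 ▸ e2)

-- ===== VERDICT (by name: the statement is the Claim_ definition above) =====
theorem calculate_median_sum_spec : Claim_equal_calculate_median_sum := by
  intro nums _
  unfold Spec_calculate_median_sum calculate_median_sum calculate_median_sum_alt
  simpa [nrev] using fold_inv nums [] [] 0 (by simp) (by simp)
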